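-- pv_equiv track=rewrite | github.com/mmcguffi/finding_DNA_repeats | find_repeats.py | create_lcparray
-- ===== SOURCE A (Python) =====
-- from operator import itemgetter
--
-- def create_lcparray(instr: str, repeat_length: int):
--     """"""  # @Todo: Add docstring
--     suffixarray = []
--     for i in range(1,len(instr)+1):
--         suffixarray.append((len(instr)-i,instr[-i:len(instr)]))
--     suffixarray.sort(key=itemgetter(1))
--
--     lcparray = []
--     for i in range(len(suffixarray)-1):
--         j = 0
--         try:
--             while suffixarray[i][1][j] == suffixarray[i+1][1][j]:
--                 j += 1
--                 if j >= repeat_length: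
--                     lcparray.append((suffixarray[i][0], j, suffixarray[i+1][0]))
--         except IndexError:
--             pass
--
--     lcparray.sort(key=itemgetter(1), reverse=True)
--
--     return lcparray
-- ===== SOURCE B (Python) =====
-- def create_lcparray(instr, repeat_length):
--     n = len(instr)
--     lo = max(repeat_length, 1)
--     sufs = [instr[a:] for a in range(n)]
--     pairs = []
--     for a in range(n):
--         ra = instr[a:]
--         r = 0
--         b = -1
--         for c in range(n):
--             if sufs[c] < ra:
--                 r += 1
--             elif c != a and (b < 0 or sufs[c] < sufs[b]):
--                 b = c
--         if b >= 0:
--             L = 0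
--             for x, y in zip(ra, sufs[b]):
--                 if x != y:
--                     break
--                 L += 1
--             pairs.append((r, a, b, L))
--     pairs.sort(key=lambda p: p[0])
--     top = 0
--     for p in pairs:
--         top = max(top, p[3])
--     out = []
--     for j in reversed(range(lo, top + 1)):
--         for (r, a, b, L) in pairs:
--             if L >= j:
--                 out.append((a, j, b))
--     return out
-- ===== Notes on version B (the rewrite author's own statement) =====
-- stated objective: alternative
-- what changed: B never sorts the suffixes and never sorts the result: for each position it counts the smaller suffixes (its rank) and scans for its lexicographic successor, sorts the (rank, pos, succ, lcp) quadruples by the precomputed integer rank, and emits the output tuples directly in final order by descending repeat length, so A's suffix-string sort, adjacent-pair while/try-except walk and final reverse sort are all gone.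
import Mathlib
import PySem

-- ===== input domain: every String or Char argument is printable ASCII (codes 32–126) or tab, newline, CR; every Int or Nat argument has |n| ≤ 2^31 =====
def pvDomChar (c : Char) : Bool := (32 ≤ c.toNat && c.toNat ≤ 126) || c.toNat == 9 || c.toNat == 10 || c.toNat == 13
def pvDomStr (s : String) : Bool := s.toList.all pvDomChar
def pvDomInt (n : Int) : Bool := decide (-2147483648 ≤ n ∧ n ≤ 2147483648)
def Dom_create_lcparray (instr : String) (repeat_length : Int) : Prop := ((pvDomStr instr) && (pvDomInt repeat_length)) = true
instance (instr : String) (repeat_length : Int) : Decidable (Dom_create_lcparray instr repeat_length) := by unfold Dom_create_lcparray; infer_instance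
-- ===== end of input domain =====

-- B replaces A's suffix sort + adjacent while/try-except walk + final reverse sort by a rank/successor
-- scan per position, one integer-key sort of the (rank, pos, succ, lcp) quadruples, and direct emission
-- of the output in final order by descending length (objective: alternative; not claimed faster).

-- ===== PORT A =====
-- the inner 'while suffixarray[i][1][j] == suffixarray[i+1][1][j]' loop with its try/except IndexError:
-- recursion on the two suffixes' char lists stops exactly where Python stops (mismatch or either string exhausted)
def pvAwhile (rl a b : Int) : List Char → List Char → Int → List (Int × Int × Int) → List (Int × Int × Int)
  | x :: xs, y :: ys, j, acc =>
    if x == y then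
      pvAwhile rl a b xs ys (j + 1) (if rl ≤ j + 1 then acc ++ [(a, j + 1, b)] else acc)
    else acc
  | _, _, _, acc => acc

def create_lcparray (instr : String) (repeat_length : Int) : List (Int × Int × Int) :=
  let n : Int := PySem.Str.len instr
  let suffixarray : List (Int × String) :=
    (PySem.List.pyRange 1 (n + 1)).foldl
      (fun acc i => acc ++ [(n - i, PySem.Str.slice instr (some (-i)) (some n))]) []
  let suffixarray := PySem.List.sorted suffixarray (fun p => p.2)
  let lcparray : List (Int × Int × Int) :=
    (PySem.List.pyRange 0 ((suffixarray.length : Int) - 1)).foldl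
      (fun acc i =>
        let p := PySem.List.pyGetD suffixarray i (0, "")
        let q := PySem.List.pyGetD suffixarray (i + 1) (0, "")
        pvAwhile repeat_length p.1 q.1 p.2.toList q.2.toList 0 acc) []
  PySem.List.sorted lcparray (fun t => t.2.1) true

-- ===== PORT B =====
-- instr[a:]
def pvSuf (s : String) (i : Int) : String := PySem.Str.slice s (some i)

-- the lcp loop 'for x, y in zip(ra, sufs[b]): if x != y: break; L += 1'
def pvLcp : List Char → List Char → Int
  | x :: xs, y :: ys => if x != y then 0 else pvLcp xs ys + 1
  | _, _ => 0

def create_lcparray_alt (instr : String) (repeat_length : Int) : List (Int × Int × Int) :=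
  let n : Int := PySem.Str.len instr
  let lo : Int := max repeat_length 1
  let sufs : List String := (PySem.List.pyRange 0 n).map (fun a => pvSuf instr a)
  let pairs : List (Int × Int × Int × Int) :=
    (PySem.List.pyRange 0 n).foldl (fun acc a =>
      let ra := pvSuf instr a
      let rb := (PySem.List.pyRange 0 n).foldl (fun rb c =>
          if PySem.List.pyGetD sufs c "" < ra then (rb.1 + 1, rb.2)
          else if c ≠ a ∧ (rb.2 < 0 ∨ PySem.List.pyGetD sufs c "" < PySem.List.pyGetD sufs rb.2 "") then (rb.1, c)
          else rb) ((0 : Int), (-1 : Int))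
      if 0 ≤ rb.2 then
        acc ++ [(rb.1, a, rb.2, pvLcp ra.toList (PySem.List.pyGetD sufs rb.2 "").toList)]
      else acc) []
  let pairs := PySem.List.sorted pairs (fun p => p.1)
  let top : Int := pairs.foldl (fun t p => max t p.2.2.2) 0
  (PySem.List.pyRange lo (top + 1)).reverse.foldl (fun out j =>
    pairs.foldl (fun out p => if j ≤ p.2.2.2 then out ++ [(p.2.1, j, p.2.2.1)] else out) out) []

-- ===== PRECONDITION & SPEC =====
def Spec_create_lcparray (instr : String) (repeat_length : Int) (out : List (Int × Int × Int)) : Prop := out = create_lcparray_alt instr repeat_length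
instance (instr : String) (repeat_length : Int) (out : List (Int × Int × Int)) : Decidable (Spec_create_lcparray instr repeat_length out) := by unfold Spec_create_lcparray; infer_instance

-- ===== CLAIM (what is proved, stated in full; the proofs are below) =====
def Claim_equal_create_lcparray : Prop := ∀ (instr : String) (repeat_length : Int), Dom_create_lcparray instr repeat_length → Spec_create_lcparray instr repeat_length (create_lcparray instr repeat_length)

-- ===== LEMMAS AND PROOFS =====

theorem pyRange_nil {a b : Int} (h : b ≤ a) : PySem.List.pyRange a b = [] := by
  simp [PySem.List.pyRange]; omega

theorem pvLcp_nonneg (s t : List Char) : 0 ≤ pvLcp s t := by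
  induction s generalizing t with
  | nil => simp [pvLcp]
  | cons x xs ih =>
    cases t with
    | nil => simp [pvLcp]
    | cons y ys =>
      simp only [pvLcp]
      split
      · omega
      · have := ih ys; omega

-- the while loop, started at counter j with accumulator acc, appends exactly a range emission
theorem pvAwhile_eq (rl a b : Int) (s t : List Char) (j : Int) (acc : List (Int × Int × Int)) :
    pvAwhile rl a b s t j acc
      = acc ++ (PySem.List.pyRange (max rl (j + 1)) (j + pvLcp s t + 1)).map (fun j' => (a, j', b)) := by
  induction s generalizing t j acc with
  | nil =>
    rw [show pvAwhile rl a b [] t j acc = acc from by cases t <;> simp [pvAwhile]]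
    rw [show pvLcp [] t = 0 from by cases t <;> simp [pvLcp], pyRange_nil (by omega)]
    simp
  | cons x xs ih =>
    cases t with
    | nil =>
      rw [show pvAwhile rl a b (x :: xs) [] j acc = acc from by simp [pvAwhile]]
      rw [show pvLcp (x :: xs) [] = 0 from by simp [pvLcp], pyRange_nil (by omega)]
      simp
    | cons y ys =>
      by_cases hxy : x = y
      · have hL := pvLcp_nonneg xs ys
        have hlcp : pvLcp (x :: xs) (y :: ys) = pvLcp xs ys + 1 := by
          simp [pvLcp, hxy]
        rw [show pvAwhile rl a b (x :: xs) (y :: ys) j acc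
              = pvAwhile rl a b xs ys (j + 1) (if rl ≤ j + 1 then acc ++ [(a, j + 1, b)] else acc) from by
            simp [pvAwhile, hxy]]
        rw [ih, hlcp]
        by_cases hrl : rl ≤ j + 1
        · rw [if_pos hrl]
          rw [show max rl (j + 1 + 1) = j + 1 + 1 from by omega,
              show max rl (j + 1) = j + 1 from by omega]
          rw [show j + (pvLcp xs ys + 1) + 1 = j + 1 + pvLcp xs ys + 1 from by ring]
          rw [PySem.List.pyRange_one_cons (show j + 1 < j + 1 + pvLcp xs ys + 1 from by omega)]
          simp
        · rw [if_neg hrl]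
          rw [show max rl (j + 1 + 1) = rl from by omega,
              show max rl (j + 1) = rl from by omega]
          rw [show j + (pvLcp xs ys + 1) + 1 = j + 1 + pvLcp xs ys + 1 from by ring]
      · rw [show pvAwhile rl a b (x :: xs) (y :: ys) j acc = acc from by simp [pvAwhile, hxy]]
        rw [show pvLcp (x :: xs) (y :: ys) = 0 from by simp [pvLcp, hxy], pyRange_nil (by omega)]
        simp

theorem map_tail' {α β : Type} (f : α → β) (l : List α) : (l.map f).tail = l.tail.map f := by
  cases l <;> simp

-- index loop 'for i in range(len(l)-1): … l[i] … l[i+1]' = fold over zip(l, l[1:]), Nat version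
theorem idx_zip_nat {β γ : Type} (d : β) (step : γ → β → β → γ) :
    ∀ (l : List β) (init : γ),
      (List.range (l.length - 1)).foldl (fun acc k => step acc (l.getD k d) (l.getD (k + 1) d)) init
        = (l.zip l.tail).foldl (fun acc pq => step acc pq.1 pq.2) init := by
  intro l
  induction l with
  | nil => intro init; simp
  | cons x xs ih =>
    intro init
    cases xs with
    | nil => simp
    | cons y ys =>
      have hlen : (x :: y :: ys).length - 1 = (y :: ys).length - 1 + 1 := by simp
      rw [hlen, List.range_succ_eq_map]
      simp only [List.foldl_cons, List.foldl_map]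
      have hcongr : ∀ init' : γ, (List.range ((y :: ys).length - 1)).foldl
            (fun acc k => step acc ((x :: y :: ys).getD (Nat.succ k) d) ((x :: y :: ys).getD (Nat.succ k + 1) d)) init'
          = (List.range ((y :: ys).length - 1)).foldl
            (fun acc k => step acc ((y :: ys).getD k d) ((y :: ys).getD (k + 1) d)) init' := by
        intro init'
        apply PySem.List.foldl_congr_mem
        intro acc k _
        rfl
      rw [hcongr, ih]
      simp

-- Int-range version, as A writes it
theorem idx_zip {β γ : Type} (l : List β) (d : β) (step : γ → β → β → γ) (init : γ) :
    (PySem.List.pyRange 0 ((l.length : Int) - 1)).foldl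
        (fun acc i => step acc (PySem.List.pyGetD l i d) (PySem.List.pyGetD l (i + 1) d)) init
      = (l.zip l.tail).foldl (fun acc pq => step acc pq.1 pq.2) init := by
  cases l with
  | nil => rw [pyRange_nil (by simp)]; simp
  | cons x xs =>
    have hcast : ((x :: xs).length : Int) - 1 = ((xs.length : Nat) : Int) := by simp
    rw [hcast, PySem.List.pyRange_zero_natCast, List.foldl_map]
    have h2 : (fun (acc : γ) (k : Nat) =>
          step acc (PySem.List.pyGetD (x :: xs) (k : Int) d) (PySem.List.pyGetD (x :: xs) ((k : Int) + 1) d))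
        = fun acc k => step acc ((x :: xs).getD k d) ((x :: xs).getD (k + 1) d) := by
      funext acc k
      rw [PySem.List.pyGetD_natCast,
          show ((k : Int) + 1) = ((k + 1 : Nat) : Int) from by push_cast; ring,
          PySem.List.pyGetD_natCast]
    rw [h2]
    have h3 := idx_zip_nat d step (x :: xs) init
    simpa using h3

-- pyRange 1 (n+1) = [1, …, n]
theorem pyRange_one_succ (n : Nat) :
    PySem.List.pyRange 1 ((n : Int) + 1) = (List.range n).map (fun k : Nat => ((k : Int) + 1)) := by
  induction n with
  | zero => exact pyRange_nil (by omega)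
  | succ m ih =>
    have h : ((m + 1 : Nat) : Int) + 1 = ((m : Int) + 1) + 1 := by push_cast; ring
    rw [h, PySem.List.pyRange_one_succ_right (by omega), ih, List.range_succ]
    simp

-- A's slice instr[-i:len(instr)] is B's suffix instr[n-i:]
theorem sliceA_eq (instr : String) (i : Int) (h1 : 1 ≤ i) (h2 : i ≤ (instr.toList.length : Int)) :
    PySem.Str.slice instr (some (-i)) (some (instr.toList.length : Int))
      = pvSuf instr ((instr.toList.length : Int) - i) := by
  apply String.toList_inj.mp
  rw [PySem.Str.toList_slice, show (pvSuf instr ((instr.toList.length : Int) - i)).toList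
      = PySem.Chars.slice instr.toList (some ((instr.toList.length : Int) - i)) none from
    PySem.Str.toList_slice instr _ _]
  show PySem.List.slice instr.toList (some (-i)) (some (instr.toList.length : Int))
      = PySem.List.slice instr.toList (some ((instr.toList.length : Int) - i)) none
  rw [PySem.List.slice_from instr.toList (a := (instr.toList.length : Int) - i) (by omega)]
  have hc1 : PySem.List.clampIdx instr.toList.length (-i) = instr.toList.length - i.toNat := by
    unfold PySem.List.clampIdx
    split_ifs <;> omega
  have hc2 : PySem.List.clampIdx instr.toList.length ((instr.toList.length : Nat) : Int) = instr.toList.length := by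
    unfold PySem.List.clampIdx
    split_ifs <;> omega
  simp only [PySem.List.slice, hc1, hc2]
  rw [List.take_of_length_le (by simp [List.length_drop])]
  congr 1
  omega

-- suffixes at distinct in-range starts are distinct (their lengths differ)
theorem pvSuf_inj (instr : String) (i j : Int) (hi : 0 ≤ i ∧ i < (instr.toList.length : Int))
    (hj : 0 ≤ j ∧ j < (instr.toList.length : Int)) (hne : i ≠ j) : pvSuf instr i ≠ pvSuf instr j := by
  intro h
  have hlen : (pvSuf instr i).toList.length = (pvSuf instr j).toList.length := by rw [h]
  rw [show (pvSuf instr i).toList = PySem.Chars.slice instr.toList (some i) none from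
        PySem.Str.toList_slice instr _ _,
      show (pvSuf instr j).toList = PySem.Chars.slice instr.toList (some j) none from
        PySem.Str.toList_slice instr _ _] at hlen
  rw [show PySem.Chars.slice instr.toList (some i) none = PySem.List.slice instr.toList (some i) none from rfl,
      show PySem.Chars.slice instr.toList (some j) none = PySem.List.slice instr.toList (some j) none from rfl,
      PySem.List.slice_from instr.toList hi.1, PySem.List.slice_from instr.toList hj.1] at hlen
  simp only [List.length_drop] at hlen
  omega

theorem map_range_reverse {β : Type} (g : Nat → β) (m : Nat) :
    ((List.range m).map g).reverse = (List.range m).map (fun k => g (m - 1 - k)) := by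
  have h : (List.range m).reverse = (List.range m).map (fun x => m - 1 - x) := by
    rw [List.range_eq_range', List.reverse_range', ← List.range_eq_range']
    simp
  rw [← List.map_reverse, h, List.map_map]
  rfl

-- B's canonical suffix order: the start indices sorted by their suffix
def pvL0 (instr : String) : List Int :=
  PySem.List.sorted (PySem.List.pyRange 0 (instr.toList.length : Int)) (fun i => pvSuf instr i)

theorem pvL0_perm (instr : String) :
    (pvL0 instr).Perm (PySem.List.pyRange 0 (instr.toList.length : Int)) :=
  PySem.List.sorted_perm _ _ _

theorem mem_pvL0 (instr : String) {a : Int} (h : a ∈ pvL0 instr) :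
    0 ≤ a ∧ a < (instr.toList.length : Int) := by
  have := (pvL0_perm instr).mem_iff.mp h
  rwa [PySem.List.mem_pyRange_one] at this

theorem pvL0_pairwise (instr : String) :
    (pvL0 instr).Pairwise (fun a b => pvSuf instr a < pvSuf instr b) := by
  have hle := PySem.List.sorted_pairwise (PySem.List.pyRange 0 (instr.toList.length : Int)) (fun i => pvSuf instr i)
  have hnodup : (pvL0 instr).Nodup := by
    refine ((pvL0_perm instr).nodup_iff).2 ?_
    rw [PySem.List.pyRange_zero_natCast]
    exact (List.nodup_range).map (fun a b => by omega)
  refine (hle.and hnodup).imp_of_mem ?_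
  intro a b ha hb hab
  have ha' := mem_pvL0 instr ha
  have hb' := mem_pvL0 instr hb
  exact lt_of_le_of_ne hab.1 (pvSuf_inj instr a b ha' hb' hab.2)

-- the two sorted suffix arrays coincide: A's (index, suffix) pairs are B's indices mapped
theorem sortedSA_eq (instr : String) :
    PySem.List.sorted
        ((PySem.List.pyRange 1 ((instr.toList.length : Int) + 1)).foldl
          (fun acc i => acc ++ [((instr.toList.length : Int) - i,
            PySem.Str.slice instr (some (-i)) (some (instr.toList.length : Int)))]) [])
        (fun p => p.2)
      = (pvL0 instr).map (fun i => (i, pvSuf instr i)) := by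
  have hU : (PySem.List.pyRange 1 ((instr.toList.length : Int) + 1)).foldl
        (fun acc i => acc ++ [((instr.toList.length : Int) - i,
          PySem.Str.slice instr (some (-i)) (some (instr.toList.length : Int)))]) []
      = ((List.range instr.toList.length).map
          (fun m : Nat => (((m : Nat) : Int), pvSuf instr ((m : Nat) : Int)))).reverse := by
    rw [map_range_reverse (fun m : Nat => (((m : Nat) : Int), pvSuf instr ((m : Nat) : Int))) instr.toList.length]
    rw [PySem.List.foldl_append_singleton_eq_map, pyRange_one_succ, List.map_map, List.nil_append]
    refine List.map_congr_left ?_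
    intro k hk
    rw [List.mem_range] at hk
    simp only [Function.comp]
    rw [sliceA_eq instr ((k : Int) + 1) (by omega) (by omega)]
    rw [show (instr.toList.length : Int) - ((k : Int) + 1) = ((instr.toList.length - 1 - k : Nat) : Int) from by omega]
  have hB : (PySem.List.pyRange 0 (instr.toList.length : Int)).map (fun i => (i, pvSuf instr i))
      = (List.range instr.toList.length).map (fun m : Nat => (((m : Nat) : Int), pvSuf instr ((m : Nat) : Int))) := by
    rw [PySem.List.pyRange_zero_natCast, List.map_map]
    rfl
  have hperm : ((pvL0 instr).map (fun i => (i, pvSuf instr i))).Perm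
      ((PySem.List.pyRange 1 ((instr.toList.length : Int) + 1)).foldl
        (fun acc i => acc ++ [((instr.toList.length : Int) - i,
          PySem.Str.slice instr (some (-i)) (some (instr.toList.length : Int)))]) []) := by
    rw [hU]
    refine List.Perm.trans (List.Perm.map _ (PySem.List.sorted_perm _ _ _)) ?_
    rw [hB]
    exact (List.reverse_perm _).symm
  have hpair : List.Pairwise (fun a b : Int × String => a.2 < b.2)
      ((pvL0 instr).map (fun i => (i, pvSuf instr i))) := by
    rw [List.pairwise_map]
    exact pvL0_pairwise instr
  exact PySem.List.sorted_eq_of_perm_of_pairwise_lt _ _ _ hperm hpair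


-- strict ordering of a python range
theorem pyRange_pairwise_lt (a b : Int) : (PySem.List.pyRange a b).Pairwise (fun x y => x < y) := by
  have H : ∀ (m : Nat) (a : Int), (PySem.List.pyRange a (a + (m : Int))).Pairwise (fun x y => x < y) := by
    intro m
    induction m with
    | zero => intro a; rw [pyRange_nil (by omega)]; exact List.Pairwise.nil
    | succ t ih =>
      intro a
      rw [PySem.List.pyRange_one_cons (by push_cast; omega)]
      constructor
      · intro y hy
        rw [PySem.List.mem_pyRange_one] at hy
        omega
      · have h2 := ih (a + 1)
        rwa [show (a + 1) + (t : Int) = a + ((t + 1 : Nat) : Int) from by push_cast; ring] at h2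
  by_cases h : a < b
  · have := H (b - a).toNat a
    rwa [show a + (((b - a).toNat : Nat) : Int) = b from by omega] at this
  · rw [pyRange_nil (by omega)]; exact List.Pairwise.nil

-- 'for x in l: if p(x): out.append(g(x))' over options, i.e. a filterMap, one branch at a time
theorem flatMap_ite_singleton {α β : Type} (p : α → Prop) [DecidablePred p] (g : α → β) (l : List α) :
    l.flatMap (fun x => if p x then [g x] else []) = (l.filter (fun x => decide (p x))).map g := by
  induction l with
  | nil => rfl
  | cons x t ih =>
    by_cases hx : p x <;> simp [hx, ih]

-- in a strictly key-increasing list, the element at position i has exactly i smaller keys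
theorem countP_lt_pairwise {α κ : Type} [LinearOrder κ] (key : α → κ) :
    ∀ (l : List α), l.Pairwise (fun x y => key x < key y) →
      ∀ i (h : i < l.length), l.countP (fun c => decide (key c < key l[i])) = i := by
  intro l hl
  induction l with
  | nil => intro i h; simp at h
  | cons x t ih =>
    have hx : ∀ y ∈ t, key x < key y := fun y hy => List.rel_of_pairwise_cons hl hy
    have ht : t.Pairwise (fun x y => key x < key y) := hl.of_cons
    intro i h
    cases i with
    | zero =>
      simp only [List.getElem_cons_zero, List.countP_cons]
      rw [List.countP_eq_zero.mpr]
      · simp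
      · intro c hc
        simp only [decide_eq_true_eq]
        exact not_lt.mpr (le_of_lt (hx c hc))
    | succ j =>
      simp only [List.getElem_cons_succ, List.countP_cons]
      have hj : j < t.length := by simp at h; omega
      have hcnt := ih ht j hj
      have hlt : key x < key (t[j]'hj) := hx _ (List.getElem_mem hj)
      rw [if_pos (by exact decide_eq_true hlt)]
      exact congrArg (fun m => m + 1) hcnt

theorem insertBy_append_left {α : Type} (before : α → α → Bool) (x : α) (l1 l2 : List α)
    (h : ∀ y ∈ l1, before x y = false) :
    PySem.List.insertBy before x (l1 ++ l2) = l1 ++ PySem.List.insertBy before x l2 := by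
  induction l1 with
  | nil => rfl
  | cons y t ih =>
    have hy : before x y = false := h y (by simp)
    simp only [List.cons_append, PySem.List.insertBy, hy]
    simp only [Bool.false_eq_true, if_false, List.cons_inj_right]
    exact ih (fun z hz => h z (by simp [hz]))

theorem insertBy_all_true {α : Type} (before : α → α → Bool) (x : α) (l : List α)
    (h : ∀ y ∈ l, before x y = true) :
    PySem.List.insertBy before x l = x :: l := by
  cases l with
  | nil => rfl
  | cons y t =>
    have hy : before x y = true := h y (by simp)
    simp [PySem.List.insertBy, hy]

-- stable insertion into a list grouped by strictly descending keys lands at the end of x's group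
theorem insertBy_grouped {α : Type} (key : α → Int) (x : α) (vs : List Int)
    (hvs : vs.Pairwise (fun a b => b < a)) (hx : key x ∈ vs) (G : Int → List α)
    (hG : ∀ v, ∀ e ∈ G v, key e = v) :
    PySem.List.insertBy (fun a b => decide (key b < key a)) x (vs.flatMap G)
      = vs.flatMap (fun v => if v = key x then G v ++ [x] else G v) := by
  induction vs with
  | nil => simp at hx
  | cons v vt ih =>
    simp only [List.flatMap_cons]
    by_cases hv : v = key x
    · have h1 : ∀ y ∈ G v, (decide (key y < key x) : Bool) = false := by
        intro y hy
        have := hG v y hy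
        simp [this, hv]
      rw [insertBy_append_left _ _ _ _ h1]
      have h2 : ∀ y ∈ vt.flatMap G, (decide (key y < key x) : Bool) = true := by
        intro y hy
        obtain ⟨w, hw, hyw⟩ := List.mem_flatMap.mp hy
        have hkey := hG w y hyw
        have hwv : w < v := List.rel_of_pairwise_cons hvs hw
        simp [hkey]
        omega
      rw [insertBy_all_true _ _ _ h2, if_pos hv]
      have h3 : vt.flatMap (fun v' => if v' = key x then G v' ++ [x] else G v') = vt.flatMap G := by
        apply List.flatMap_congr
        intro v' hv'
        have : v' < v := List.rel_of_pairwise_cons hvs hv'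
        rw [if_neg (by omega)]
      rw [h3, List.append_assoc]
      rfl
    · have hxvt : key x ∈ vt := by
        rcases List.mem_cons.mp hx with h | h
        · exact absurd h.symm hv
        · exact h
      have hxv : key x < v := List.rel_of_pairwise_cons hvs hxvt
      have h1 : ∀ y ∈ G v, (decide (key y < key x) : Bool) = false := by
        intro y hy
        have := hG v y hy
        simp [this]
        omega
      rw [insertBy_append_left _ _ _ _ h1, if_neg hv]
      exact congrArg (G v ++ ·) (ih hvs.of_cons hxvt)

-- a stable reverse sort by key is the concatenation of the key-groups, keys strictly descending
theorem sorted_rev_flatMap_filter {α : Type} (key : α → Int) (xs : List α) (vs : List Int)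
    (hvs : vs.Pairwise (fun a b => b < a)) (h : ∀ e ∈ xs, key e ∈ vs) :
    PySem.List.sorted xs key true = vs.flatMap (fun v => xs.filter (fun e => decide (key e = v))) := by
  induction xs using List.reverseRecOn with
  | nil =>
    rw [PySem.List.sorted_rev_eq_foldl_insertBy]
    simp
  | append_singleton xs x ih =>
    rw [PySem.List.sorted_rev_eq_foldl_insertBy, List.foldl_append,
        ← PySem.List.sorted_rev_eq_foldl_insertBy]
    simp only [List.foldl_cons, List.foldl_nil]
    rw [ih (fun e he => h e (by simp [he]))]
    rw [insertBy_grouped key x vs hvs (h x (by simp)) _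
        (fun v e he => by simpa using (List.mem_filter.mp he).2)]
    apply List.flatMap_congr
    intro v _
    by_cases hvk : v = key x
    · rw [if_pos hvk, List.filter_append]
      simp [hvk]
    · rw [if_neg hvk, List.filter_append]
      have : (decide (key x = v) : Bool) = false := by
        simp
        exact fun hh => hvk hh.symm
      simp [this]

theorem pyRange_filter_eq (lo hi j : Int) :
    (PySem.List.pyRange lo hi).filter (fun x => decide (x = j)) = if lo ≤ j ∧ j < hi then [j] else [] := by
  have hnd : (PySem.List.pyRange lo hi).Nodup := (pyRange_pairwise_lt lo hi).imp ne_of_lt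
  have hfe : (fun x : Int => decide (x = j)) = (fun x : Int => x == j) := by
    funext x; exact Eq.symm (Bool.beq_eq_decide_eq x j) |>.symm
  rw [hfe, List.filter_beq]
  by_cases hm : j ∈ PySem.List.pyRange lo hi
  · rw [List.count_eq_one_of_mem hnd hm]
    rw [PySem.List.mem_pyRange_one] at hm
    simp [hm]
  · rw [List.count_eq_zero_of_not_mem hm]
    rw [PySem.List.mem_pyRange_one] at hm
    simp only [List.replicate_zero]
    rw [if_neg hm]

-- the canonical quadruple list: SA-adjacent pairs with their rank index and lcp
def pvBuildT (instr : String) : List Int → Int → List (Int × Int × Int × Int)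
  | a :: b :: rest, k => (k, a, b, pvLcp (pvSuf instr a).toList (pvSuf instr b).toList)
      :: pvBuildT instr (b :: rest) (k + 1)
  | _, _ => []

theorem pvBuildT_ge (instr : String) : ∀ (l : List Int) (k : Int) (q : Int × Int × Int × Int),
    q ∈ pvBuildT instr l k → k ≤ q.1 := by
  intro l
  induction l with
  | nil => intro k q hq; simp [pvBuildT] at hq
  | cons a t ih =>
    intro k q hq
    cases t with
    | nil => simp [pvBuildT] at hq
    | cons b rest =>
      simp only [pvBuildT, List.mem_cons] at hq
      rcases hq with hq | hq
      · subst hq; simp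
      · have := ih (k + 1) q hq
        omega

theorem pvBuildT_pairwise (instr : String) : ∀ (l : List Int) (k : Int),
    (pvBuildT instr l k).Pairwise (fun p q => p.1 < q.1) := by
  intro l
  induction l with
  | nil => intro k; simp [pvBuildT]
  | cons a t ih =>
    intro k
    cases t with
    | nil => simp [pvBuildT]
    | cons b rest =>
      simp only [pvBuildT]
      constructor
      · intro q hq
        have := pvBuildT_ge instr (b :: rest) (k + 1) q hq
        simp only
        omega
      · exact ih (k + 1)

theorem pvBuildT_map (instr : String) : ∀ (l : List Int) (k : Int),
    (pvBuildT instr l k).map (fun q => (q.2.1, q.2.2.1, q.2.2.2))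
      = (l.zip l.tail).map (fun ab => (ab.1, ab.2, pvLcp (pvSuf instr ab.1).toList (pvSuf instr ab.2).toList)) := by
  intro l
  induction l with
  | nil => intro k; simp [pvBuildT]
  | cons a t ih =>
    intro k
    cases t with
    | nil => simp [pvBuildT]
    | cons b rest =>
      simp only [pvBuildT, List.tail_cons, List.zip_cons_cons, List.map_cons]
      rw [show (b :: rest).tail = rest from rfl] at ih
      exact congrArg _ (ih (k + 1))

-- looking up one of B's precomputed suffixes
theorem sufs_get (instr : String) {c : Int} (hc : 0 ≤ c ∧ c < (instr.toList.length : Int)) :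
    PySem.List.pyGetD ((PySem.List.pyRange 0 (instr.toList.length : Int)).map (fun a => pvSuf instr a)) c ""
      = pvSuf instr c := by
  have hc' : c = ((c.toNat : Nat) : Int) := by omega
  rw [hc']
  exact PySem.List.pyGetD_map_pyRange (fun a => pvSuf instr a) instr.toList.length c.toNat "" (by omega)

-- the second component of B's inner scan, as a standalone step function
def pvStep (instr : String) (a b c : Int) : Int :=
  if PySem.List.pyGetD ((PySem.List.pyRange 0 (instr.toList.length : Int)).map (fun a => pvSuf instr a)) c "" < pvSuf instr a then b
  else if c ≠ a ∧ (b < 0 ∨ PySem.List.pyGetD ((PySem.List.pyRange 0 (instr.toList.length : Int)).map (fun a => pvSuf instr a)) c ""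
        < PySem.List.pyGetD ((PySem.List.pyRange 0 (instr.toList.length : Int)).map (fun a => pvSuf instr a)) b "") then c
  else b

-- B's inner scan keeps -1 until a candidate (a suffix greater than suffix a) appears,
-- then holds the minimal candidate
theorem pvBScan (instr : String) (a : Int) :
    ∀ cs : List Int, (∀ c ∈ cs, 0 ≤ c ∧ c < (instr.toList.length : Int)) →
      (cs.foldl (pvStep instr a) (-1) = -1
        ∧ cs.filter (fun c => decide (¬ pvSuf instr c < pvSuf instr a ∧ c ≠ a)) = [])
      ∨ (cs.foldl (pvStep instr a) (-1) ∈ cs.filter (fun c => decide (¬ pvSuf instr c < pvSuf instr a ∧ c ≠ a))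
        ∧ ∀ y ∈ cs.filter (fun c => decide (¬ pvSuf instr c < pvSuf instr a ∧ c ≠ a)),
            pvSuf instr (cs.foldl (pvStep instr a) (-1)) ≤ pvSuf instr y) := by
  intro cs
  induction cs using List.reverseRecOn with
  | nil => intro _; left; exact ⟨rfl, rfl⟩
  | append_singleton cs c ihc =>
    intro hmem
    have hc : 0 ≤ c ∧ c < (instr.toList.length : Int) := hmem c (by simp)
    have hmem' : ∀ x ∈ cs, 0 ≤ x ∧ x < (instr.toList.length : Int) := fun x hx => hmem x (by simp [hx])
    have ih := ihc hmem'
    rw [List.foldl_append, List.filter_append]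
    simp only [List.foldl_cons, List.foldl_nil]
    rw [show pvStep instr a (cs.foldl (pvStep instr a) (-1)) c
        = (if PySem.List.pyGetD ((PySem.List.pyRange 0 (instr.toList.length : Int)).map (fun a => pvSuf instr a)) c "" < pvSuf instr a then cs.foldl (pvStep instr a) (-1)
           else if c ≠ a ∧ (cs.foldl (pvStep instr a) (-1) < 0 ∨ PySem.List.pyGetD ((PySem.List.pyRange 0 (instr.toList.length : Int)).map (fun a => pvSuf instr a)) c ""
                < PySem.List.pyGetD ((PySem.List.pyRange 0 (instr.toList.length : Int)).map (fun a => pvSuf instr a)) (cs.foldl (pvStep instr a) (-1)) "") then c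
           else cs.foldl (pvStep instr a) (-1)) from rfl]
    rw [sufs_get instr hc]
    by_cases h1 : pvSuf instr c < pvSuf instr a
    · rw [if_pos h1]
      have hp : (decide (¬ pvSuf instr c < pvSuf instr a ∧ c ≠ a) : Bool) = false := by simp [h1]
      simp only [List.filter_cons, hp, List.filter_nil]
      simpa using ih
    · rw [if_neg h1]
      by_cases h2 : c = a
      · rw [if_neg (by simp [h2])]
        have hp : (decide (¬ pvSuf instr c < pvSuf instr a ∧ c ≠ a) : Bool) = false := by simp [h2]
        simp only [List.filter_cons, hp, List.filter_nil]
        simpa using ih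
      · have hp : (decide (¬ pvSuf instr c < pvSuf instr a ∧ c ≠ a) : Bool) = true := by simp [h1, h2]
        simp only [List.filter_cons, hp, List.filter_nil, if_true]
        rcases ih with ⟨hb, hf⟩ | ⟨hbmem, hbmin⟩
        · rw [hb, if_pos ⟨h2, Or.inl (by omega)⟩, hf]
          right
          constructor
          · simp
          · intro y hy
            simp at hy
            rw [hy]
        · have hbcs : cs.foldl (pvStep instr a) (-1) ∈ cs := List.mem_of_mem_filter hbmem
          have hbb : 0 ≤ cs.foldl (pvStep instr a) (-1) ∧ cs.foldl (pvStep instr a) (-1) < (instr.toList.length : Int) := hmem' _ hbcs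
          rw [sufs_get instr hbb]
          by_cases h3 : pvSuf instr c < pvSuf instr (cs.foldl (pvStep instr a) (-1))
          · rw [if_pos ⟨h2, Or.inr h3⟩]
            right
            constructor
            · simp
            · intro y hy
              rw [List.mem_append] at hy
              rcases hy with hy | hy
              · exact le_of_lt (lt_of_lt_of_le h3 (hbmin y hy))
              · simp at hy; rw [hy]
          · rw [if_neg (by push Not; intro _; exact ⟨by omega, le_of_not_gt h3⟩)]
            right
            constructor
            · exact List.mem_append_left _ hbmem
            · intro y hy
              rw [List.mem_append] at hy
              rcases hy with hy | hy
              · exact hbmin y hy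
              · simp at hy
                rw [hy]
                exact le_of_not_gt h3

-- the body of B's outer position loop, as an Option (mirrors the port's inline code)
def pvF (instr : String) (a : Int) : Option (Int × Int × Int × Int) :=
  let n : Int := PySem.Str.len instr
  let sufs : List String := (PySem.List.pyRange 0 n).map (fun a => pvSuf instr a)
  let ra := pvSuf instr a
  let rb := (PySem.List.pyRange 0 n).foldl (fun rb c =>
      if PySem.List.pyGetD sufs c "" < ra then (rb.1 + 1, rb.2)
      else if c ≠ a ∧ (rb.2 < 0 ∨ PySem.List.pyGetD sufs c "" < PySem.List.pyGetD sufs rb.2 "") then (rb.1, c)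
      else rb) ((0 : Int), (-1 : Int))
  if 0 ≤ rb.2 then
    some (rb.1, a, rb.2, pvLcp ra.toList (PySem.List.pyGetD sufs rb.2 "").toList)
  else none

-- splitting B's inner scan into its two independent accumulators
theorem pvF_eq (instr : String) (a : Int) :
    pvF instr a =
      (if 0 ≤ (PySem.List.pyRange 0 (instr.toList.length : Int)).foldl (pvStep instr a) (-1) then
        some ((PySem.List.pyRange 0 (instr.toList.length : Int)).foldl
                (fun r c => if PySem.List.pyGetD ((PySem.List.pyRange 0 (instr.toList.length : Int)).map (fun a => pvSuf instr a)) c "" < pvSuf instr a then r + 1 else r) 0,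
              a,
              (PySem.List.pyRange 0 (instr.toList.length : Int)).foldl (pvStep instr a) (-1),
              pvLcp (pvSuf instr a).toList
                (PySem.List.pyGetD ((PySem.List.pyRange 0 (instr.toList.length : Int)).map (fun a => pvSuf instr a))
                  ((PySem.List.pyRange 0 (instr.toList.length : Int)).foldl (pvStep instr a) (-1)) "").toList)
      else none) := by
  have hlen : PySem.Str.len instr = ((instr.toList.length : Nat) : Int) := by
    simp [PySem.Str.len]
  simp only [pvF, hlen]
  rw [show (fun (rb : Int × Int) (c : Int) =>
      if PySem.List.pyGetD ((PySem.List.pyRange 0 (instr.toList.length : Int)).map (fun a => pvSuf instr a)) c "" < pvSuf instr a then (rb.1 + 1, rb.2)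
      else if c ≠ a ∧ (rb.2 < 0 ∨ PySem.List.pyGetD ((PySem.List.pyRange 0 (instr.toList.length : Int)).map (fun a => pvSuf instr a)) c ""
            < PySem.List.pyGetD ((PySem.List.pyRange 0 (instr.toList.length : Int)).map (fun a => pvSuf instr a)) rb.2 "") then (rb.1, c)
      else rb)
    = (fun (s : Int × Int) (e : Int) =>
        ((fun r c => if PySem.List.pyGetD ((PySem.List.pyRange 0 (instr.toList.length : Int)).map (fun a => pvSuf instr a)) c "" < pvSuf instr a then r + 1 else r) s.1 e,
         pvStep instr a s.2 e)) from by
      funext s e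
      simp only [pvStep]
      split_ifs <;> rfl]
  rw [PySem.List.foldl_prod_mk
      (f := fun r c => if PySem.List.pyGetD ((PySem.List.pyRange 0 (instr.toList.length : Int)).map (fun a => pvSuf instr a)) c "" < pvSuf instr a then r + 1 else r)
      (g := pvStep instr a)]

-- at a non-maximal suffix position, B's scan finds the rank and the SA-successor
set_option maxHeartbeats 1000000 in
theorem pvF_mid (instr : String) (i : Nat) (h : i + 1 < (pvL0 instr).length) :
    pvF instr ((pvL0 instr)[i]'(by omega))
      = some ((0 : Int) + (i : Int), (pvL0 instr)[i]'(by omega), (pvL0 instr)[i+1]'h,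
          pvLcp (pvSuf instr ((pvL0 instr)[i]'(by omega))).toList
                (pvSuf instr ((pvL0 instr)[i+1]'h)).toList) := by
  have hi : i < (pvL0 instr).length := by omega
  have hmem_a : (pvL0 instr)[i]'hi ∈ pvL0 instr := List.getElem_mem hi
  have hmem_s : (pvL0 instr)[i+1]'h ∈ pvL0 instr := List.getElem_mem h
  have hbnd_a := mem_pvL0 instr hmem_a
  have hbnd_s := mem_pvL0 instr hmem_s
  have hpair := List.pairwise_iff_getElem.mp (pvL0_pairwise instr)
  have hlt_as : pvSuf instr ((pvL0 instr)[i]'hi) < pvSuf instr ((pvL0 instr)[i+1]'h) :=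
    hpair i (i+1) hi h (by omega)
  rw [pvF_eq]
  -- the scan's second component is the SA-successor
  have hscan := pvBScan instr ((pvL0 instr)[i]'hi) (PySem.List.pyRange 0 (instr.toList.length : Int))
    (fun c hc => (PySem.List.mem_pyRange_one (x := c) (a := 0) (b := (instr.toList.length : Int))).mp hc)
  have hs_filter : (pvL0 instr)[i+1]'h ∈ (PySem.List.pyRange 0 (instr.toList.length : Int)).filter
      (fun c => decide (¬ pvSuf instr c < pvSuf instr ((pvL0 instr)[i]'hi) ∧ c ≠ (pvL0 instr)[i]'hi)) := by
    rw [List.mem_filter]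
    refine ⟨(pvL0_perm instr).subset hmem_s, ?_⟩
    simp only [decide_eq_true_eq]
    exact ⟨not_lt_of_gt hlt_as, fun he => absurd (congrArg (pvSuf instr) he) (ne_of_gt hlt_as)⟩
  rcases hscan with ⟨_, hf⟩ | ⟨hbmem, hbmin⟩
  · rw [hf] at hs_filter
    simp at hs_filter
  · -- identify the scan result with the successor
    have hb_in := List.mem_filter.mp hbmem
    have hb_rng := (PySem.List.mem_pyRange_one (a := 0) (b := (instr.toList.length : Int))).mp hb_in.1
    have hb_pred := hb_in.2
    simp only [decide_eq_true_eq] at hb_pred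
    have hb_gt : pvSuf instr ((pvL0 instr)[i]'hi)
        < pvSuf instr ((PySem.List.pyRange 0 (instr.toList.length : Int)).foldl (pvStep instr ((pvL0 instr)[i]'hi)) (-1)) := by
      rcases hb_pred with ⟨hnlt, hne⟩
      rcases lt_or_eq_of_le (not_lt.mp hnlt) with h' | h'
      · exact h'
      · exact absurd h'.symm (pvSuf_inj instr _ _ hb_rng hbnd_a hne)
    have hle1 : pvSuf instr ((PySem.List.pyRange 0 (instr.toList.length : Int)).foldl (pvStep instr ((pvL0 instr)[i]'hi)) (-1))
        ≤ pvSuf instr ((pvL0 instr)[i+1]'h) := hbmin _ hs_filter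
    have hle2 : pvSuf instr ((pvL0 instr)[i+1]'h)
        ≤ pvSuf instr ((PySem.List.pyRange 0 (instr.toList.length : Int)).foldl (pvStep instr ((pvL0 instr)[i]'hi)) (-1)) := by
      have hbL : (PySem.List.pyRange 0 (instr.toList.length : Int)).foldl (pvStep instr ((pvL0 instr)[i]'hi)) (-1) ∈ pvL0 instr :=
        (pvL0_perm instr).mem_iff.mpr hb_in.1
      obtain ⟨k, hk, hbk⟩ := List.mem_iff_getElem.mp hbL
      have hkgt : pvSuf instr ((pvL0 instr)[i]'hi) < pvSuf instr ((pvL0 instr)[k]'hk) := by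
        rw [hbk]; exact hb_gt
      have hik : i < k := by
        rcases Nat.lt_trichotomy i k with h' | h' | h'
        · exact h'
        · exfalso; subst h'; exact absurd hkgt (lt_irrefl _)
        · exact absurd (hpair k i hk hi h') (not_lt_of_gt hkgt)
      have hfin : pvSuf instr ((pvL0 instr)[i+1]'h) ≤ pvSuf instr ((pvL0 instr)[k]'hk) := by
        rcases Nat.lt_or_ge (i+1) k with h' | h'
        · exact le_of_lt (hpair (i+1) k h hk h')
        · have hke : k = i + 1 := by omega
          exact le_of_eq (by subst hke; rfl)
      rw [← hbk]
      exact hfin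
    have hbeq : (PySem.List.pyRange 0 (instr.toList.length : Int)).foldl (pvStep instr ((pvL0 instr)[i]'hi)) (-1)
        = (pvL0 instr)[i+1]'h := by
      by_contra hne
      exact absurd (le_antisymm hle1 hle2) (pvSuf_inj instr _ _ hb_rng hbnd_s hne)
    rw [hbeq, if_pos hbnd_s.1]
    -- the rank component counts the smaller suffixes
    have hrank : (PySem.List.pyRange 0 (instr.toList.length : Int)).foldl
        (fun r c => if PySem.List.pyGetD ((PySem.List.pyRange 0 (instr.toList.length : Int)).map (fun a => pvSuf instr a)) c "" < pvSuf instr ((pvL0 instr)[i]'hi) then r + 1 else r) 0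
        = (0 : Int) + (i : Int) := by
      rw [PySem.List.foldl_ite_add_one
        (p := fun c => PySem.List.pyGetD ((PySem.List.pyRange 0 (instr.toList.length : Int)).map (fun a => pvSuf instr a)) c "" < pvSuf instr ((pvL0 instr)[i]'hi))]
      have hc1 : (PySem.List.pyRange 0 (instr.toList.length : Int)).countP
            (fun c => decide (PySem.List.pyGetD ((PySem.List.pyRange 0 (instr.toList.length : Int)).map (fun a => pvSuf instr a)) c "" < pvSuf instr ((pvL0 instr)[i]'hi)))
          = (PySem.List.pyRange 0 (instr.toList.length : Int)).countP
            (fun c => decide (pvSuf instr c < pvSuf instr ((pvL0 instr)[i]'hi))) := by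
        apply List.countP_congr
        intro c hc
        simp only [decide_eq_true_eq]
        rw [sufs_get instr ((PySem.List.mem_pyRange_one (x := c) (a := 0) (b := (instr.toList.length : Int))).mp hc)]
      rw [hc1,
        (pvL0_perm instr).symm.countP_eq
          (p := fun c => decide (pvSuf instr c < pvSuf instr ((pvL0 instr)[i]'hi))),
        countP_lt_pairwise (fun c => pvSuf instr c) (pvL0 instr) (pvL0_pairwise instr) i hi]
    rw [hrank, sufs_get instr hbnd_s]

-- at the maximal suffix there is no successor and B appends nothing
set_option maxHeartbeats 1000000 in
theorem pvF_last (instr : String) (h : pvL0 instr ≠ []) :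
    pvF instr ((pvL0 instr).getLast h) = none := by
  have hlen0 : 0 < (pvL0 instr).length := List.length_pos_iff.mpr h
  have hi : (pvL0 instr).length - 1 < (pvL0 instr).length := by omega
  rw [List.getLast_eq_getElem h]
  have hmem_a : (pvL0 instr)[(pvL0 instr).length - 1]'hi ∈ pvL0 instr := List.getElem_mem hi
  have hbnd_a := mem_pvL0 instr hmem_a
  have hpair := List.pairwise_iff_getElem.mp (pvL0_pairwise instr)
  rw [pvF_eq]
  have hscan := pvBScan instr ((pvL0 instr)[(pvL0 instr).length - 1]'hi) (PySem.List.pyRange 0 (instr.toList.length : Int))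
    (fun c hc => (PySem.List.mem_pyRange_one (x := c) (a := 0) (b := (instr.toList.length : Int))).mp hc)
  rcases hscan with ⟨hb, _⟩ | ⟨hbmem, _⟩
  · rw [hb]
    norm_num
  · exfalso
    have hb_in := List.mem_filter.mp hbmem
    have hb_rng := (PySem.List.mem_pyRange_one (a := 0) (b := (instr.toList.length : Int))).mp hb_in.1
    have hb_pred := hb_in.2
    simp only [decide_eq_true_eq] at hb_pred
    have hb_gt : pvSuf instr ((pvL0 instr)[(pvL0 instr).length - 1]'hi)
        < pvSuf instr ((PySem.List.pyRange 0 (instr.toList.length : Int)).foldl (pvStep instr ((pvL0 instr)[(pvL0 instr).length - 1]'hi)) (-1)) := by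
      rcases hb_pred with ⟨hnlt, hne⟩
      rcases lt_or_eq_of_le (not_lt.mp hnlt) with h' | h'
      · exact h'
      · exact absurd h'.symm (pvSuf_inj instr _ _ hb_rng hbnd_a hne)
    have hbL : (PySem.List.pyRange 0 (instr.toList.length : Int)).foldl (pvStep instr ((pvL0 instr)[(pvL0 instr).length - 1]'hi)) (-1) ∈ pvL0 instr :=
      (pvL0_perm instr).mem_iff.mpr hb_in.1
    obtain ⟨k, hk, hbk⟩ := List.mem_iff_getElem.mp hbL
    rw [← hbk] at hb_gt
    rcases Nat.lt_or_ge k ((pvL0 instr).length - 1) with h' | h'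
    · exact absurd (hpair k _ hk hi h') (not_lt_of_gt hb_gt)
    · have : k = (pvL0 instr).length - 1 := by omega
      subst this
      exact absurd hb_gt (lt_irrefl _)

theorem filterMap_buildT (instr : String) : ∀ (l : List Int) (k : Int),
    (∀ i (h : i + 1 < l.length),
        pvF instr (l[i]'(by omega)) = some (k + (i : Int), l[i]'(by omega), l[i+1]'h,
          pvLcp (pvSuf instr (l[i]'(by omega))).toList (pvSuf instr (l[i+1]'h)).toList)) →
    (∀ h : l ≠ [], pvF instr (l.getLast h) = none) →
    l.filterMap (pvF instr) = pvBuildT instr l k := by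
  intro l
  induction l with
  | nil => intro k _ _; rfl
  | cons a t ih =>
    intro k hmid hlast
    cases t with
    | nil =>
      have := hlast (by simp)
      simp only [List.getLast_singleton] at this
      simp [List.filterMap, this, pvBuildT]
    | cons b rest =>
      have h0 := hmid 0 (by simp)
      simp only [List.getElem_cons_zero, List.getElem_cons_succ, Nat.cast_zero] at h0
      rw [List.filterMap_cons, h0]
      simp only [pvBuildT]
      rw [show k + (0 : Int) = k from by ring]
      congr 1
      apply ih (k + 1)
      · intro i hlt
        have := hmid (i + 1) (by simpa using hlt)
        simp only [List.getElem_cons_succ] at this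
        rw [this]
        congr 2
        push_cast
        ring
      · intro hne
        have := hlast (by simp)
        rwa [List.getLast_cons (by simp)] at this

-- A reduces to: stable reverse sort (by length) of the blocks emitted along SA-adjacent pairs
set_option maxHeartbeats 1000000 in
theorem A_reduces (instr : String) (rl : Int) :
    create_lcparray instr rl
      = PySem.List.sorted
          (((pvL0 instr).zip (pvL0 instr).tail).flatMap (fun ab =>
            (PySem.List.pyRange (max rl 1) (pvLcp (pvSuf instr ab.1).toList (pvSuf instr ab.2).toList + 1)).map
              (fun j => (ab.1, j, ab.2))))
          (fun t => t.2.1) true := by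
  simp only [create_lcparray]
  rw [show PySem.Str.len instr = ((instr.toList.length : Nat) : Int) from by simp [PySem.Str.len]]
  congr 1
  rw [sortedSA_eq]
  rw [idx_zip _ ((0 : Int), "")
      (fun acc (p q : Int × String) => pvAwhile rl p.1 q.1 p.2.toList q.2.toList 0 acc)]
  rw [map_tail', List.zip_map, List.foldl_map]
  rw [← List.nil_append (((pvL0 instr).zip (pvL0 instr).tail).flatMap _),
      ← PySem.List.foldl_append_eq_flatMap]
  apply PySem.List.foldl_congr_mem
  intro acc pq _
  rw [pvAwhile_eq]
  norm_num

-- B reduces to: direct emission, lengths descending, over the rank-sorted quadruple list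
set_option maxHeartbeats 1000000 in
theorem B_reduces (instr : String) (rl : Int) :
    create_lcparray_alt instr rl
      = (PySem.List.pyRange (max rl 1)
            ((pvBuildT instr (pvL0 instr) 0).foldl (fun t p => max t p.2.2.2) 0 + 1)).reverse.flatMap
          (fun j => ((pvBuildT instr (pvL0 instr) 0).filter (fun q => decide (j ≤ q.2.2.2))).map
            (fun q => (q.2.1, j, q.2.2.1))) := by
  have hlen : PySem.Str.len instr = ((instr.toList.length : Nat) : Int) := by simp [PySem.Str.len]
  simp only [create_lcparray_alt]
  rw [hlen]
  have h1 : (PySem.List.pyRange 0 (instr.toList.length : Int)).foldl (fun acc a =>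
      let ra := pvSuf instr a
      let rb := (PySem.List.pyRange 0 (instr.toList.length : Int)).foldl (fun rb c =>
          if PySem.List.pyGetD ((PySem.List.pyRange 0 (instr.toList.length : Int)).map (fun a => pvSuf instr a)) c "" < ra then (rb.1 + 1, rb.2)
          else if c ≠ a ∧ (rb.2 < 0 ∨ PySem.List.pyGetD ((PySem.List.pyRange 0 (instr.toList.length : Int)).map (fun a => pvSuf instr a)) c ""
                < PySem.List.pyGetD ((PySem.List.pyRange 0 (instr.toList.length : Int)).map (fun a => pvSuf instr a)) rb.2 "") then (rb.1, c)
          else rb) ((0 : Int), (-1 : Int))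
      if 0 ≤ rb.2 then
        acc ++ [(rb.1, a, rb.2, pvLcp ra.toList (PySem.List.pyGetD ((PySem.List.pyRange 0 (instr.toList.length : Int)).map (fun a => pvSuf instr a)) rb.2 "").toList)]
      else acc) []
      = (PySem.List.pyRange 0 (instr.toList.length : Int)).filterMap (pvF instr) := by
    rw [List.filterMap_eq_flatMap_toList,
        ← List.nil_append ((PySem.List.pyRange 0 (instr.toList.length : Int)).flatMap _),
        ← PySem.List.foldl_append_eq_flatMap]
    apply PySem.List.foldl_congr_mem
    intro acc a _
    simp only [pvF, hlen]
    split_ifs with hcond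
    · simp
    · simp
  rw [h1]
  have h2 : PySem.List.sorted ((PySem.List.pyRange 0 (instr.toList.length : Int)).filterMap (pvF instr)) (fun p => p.1)
      = pvBuildT instr (pvL0 instr) 0 := by
    apply PySem.List.sorted_eq_of_perm_of_pairwise_lt
    · rw [← filterMap_buildT instr (pvL0 instr) 0 (fun i h => pvF_mid instr i h) (fun h => pvF_last instr h)]
      exact (pvL0_perm instr).filterMap _
    · exact pvBuildT_pairwise instr _ _
  rw [h2]
  rw [show (fun (out : List (Int × Int × Int)) (j : Int) =>
        (pvBuildT instr (pvL0 instr) 0).foldl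
          (fun (out : List (Int × Int × Int)) (p : Int × Int × Int × Int) =>
            if j ≤ p.2.2.2 then out ++ [(p.2.1, j, p.2.2.1)] else out) out)
      = (fun out j => out ++ ((pvBuildT instr (pvL0 instr) 0).filter (fun q => decide (j ≤ q.2.2.2))).map
          (fun q => (q.2.1, j, q.2.2.1))) from by
    funext out j
    exact PySem.List.foldl_append_ite (fun p : Int × Int × Int × Int => j ≤ p.2.2.2)
      (fun p : Int × Int × Int × Int => (p.2.1, j, p.2.2.1)) _ out]
  rw [PySem.List.foldl_append_eq_flatMap, List.nil_append]

-- ===== VERDICT (by name: the statement is the Claim_ definition above) =====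
set_option maxHeartbeats 1000000 in
theorem create_lcparray_spec : Claim_equal_create_lcparray := by
  intro instr rl _
  unfold Spec_create_lcparray
  rw [A_reduces, B_reduces]
  have hvs : ((PySem.List.pyRange (max rl 1)
      ((pvBuildT instr (pvL0 instr) 0).foldl (fun t p => max t p.2.2.2) 0 + 1)).reverse).Pairwise
      (fun a b => b < a) := by
    rw [List.pairwise_reverse]
    exact pyRange_pairwise_lt _ _
  have hkeys : ∀ e ∈ ((pvL0 instr).zip (pvL0 instr).tail).flatMap (fun ab =>
      (PySem.List.pyRange (max rl 1) (pvLcp (pvSuf instr ab.1).toList (pvSuf instr ab.2).toList + 1)).map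
        (fun j => (ab.1, j, ab.2))),
      e.2.1 ∈ (PySem.List.pyRange (max rl 1)
        ((pvBuildT instr (pvL0 instr) 0).foldl (fun t p => max t p.2.2.2) 0 + 1)).reverse := by
    intro e he
    obtain ⟨ab, hab, he'⟩ := List.mem_flatMap.mp he
    obtain ⟨j, hj, rfl⟩ := List.mem_map.mp he'
    rw [PySem.List.mem_pyRange_one] at hj
    rw [List.mem_reverse, PySem.List.mem_pyRange_one]
    refine ⟨hj.1, ?_⟩
    show j < (pvBuildT instr (pvL0 instr) 0).foldl (fun t p => max t p.2.2.2) 0 + 1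
    have habq : (ab.1, ab.2, pvLcp (pvSuf instr ab.1).toList (pvSuf instr ab.2).toList)
        ∈ (pvBuildT instr (pvL0 instr) 0).map (fun q => (q.2.1, q.2.2.1, q.2.2.2)) := by
      rw [pvBuildT_map]
      exact List.mem_map.mpr ⟨ab, hab, rfl⟩
    obtain ⟨q, hq, hqe⟩ := List.mem_map.mp habq
    have hle := (PySem.List.le_foldl_max_int (pvBuildT instr (pvL0 instr) 0) (fun p => p.2.2.2) 0).2 q hq
    have : q.2.2.2 = pvLcp (pvSuf instr ab.1).toList (pvSuf instr ab.2).toList := by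
      have := congrArg (fun t => t.2.2) hqe
      simpa using this
    omega
  rw [sorted_rev_flatMap_filter (key := fun t : Int × Int × Int => t.2.1) _ _ hvs hkeys]
  apply List.flatMap_congr
  intro j hj
  have hloj : max rl 1 ≤ j := by
    rw [List.mem_reverse, PySem.List.mem_pyRange_one] at hj
    exact hj.1
  rw [List.filter_flatMap]
  have hblock : ∀ ab ∈ (pvL0 instr).zip (pvL0 instr).tail,
      ((PySem.List.pyRange (max rl 1) (pvLcp (pvSuf instr ab.1).toList (pvSuf instr ab.2).toList + 1)).map
        (fun j' => (ab.1, j', ab.2))).filter (fun e => decide (e.2.1 = j))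
      = if j ≤ pvLcp (pvSuf instr ab.1).toList (pvSuf instr ab.2).toList then [(ab.1, j, ab.2)] else [] := by
    intro ab _
    rw [List.filter_map]
    rw [show ((fun (e : Int × Int × Int) => decide (e.2.1 = j)) ∘ (fun j' => (ab.1, j', ab.2)))
        = fun j' => decide (j' = j) from rfl]
    rw [pyRange_filter_eq]
    by_cases hc : j ≤ pvLcp (pvSuf instr ab.1).toList (pvSuf instr ab.2).toList
    · rw [if_pos ⟨hloj, by omega⟩, if_pos hc]
      rfl
    · rw [if_neg (by omega), if_neg hc]
      rfl
  rw [List.flatMap_congr hblock]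
  rw [flatMap_ite_singleton
      (p := fun ab : Int × Int => j ≤ pvLcp (pvSuf instr ab.1).toList (pvSuf instr ab.2).toList)
      (g := fun ab : Int × Int => (ab.1, j, ab.2))]
  have hstep : ((pvBuildT instr (pvL0 instr) 0).filter (fun q => decide (j ≤ q.2.2.2))).map
        (fun q => (q.2.1, j, q.2.2.1))
      = (((pvBuildT instr (pvL0 instr) 0).map (fun q => (q.2.1, q.2.2.1, q.2.2.2))).filter
          (fun u => decide (j ≤ u.2.2))).map (fun u => (u.1, j, u.2.1)) := by
    rw [List.filter_map, List.map_map]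
    rfl
  rw [hstep, pvBuildT_map, List.filter_map, List.map_map]
  rfl
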